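-- pv_equiv track=rewrite | github.com/dougfoo/karuisearch | src/scrapers/tokyu_resort_browser_scraper.py | filter_property_images
-- ===== SOURCE A (Python) =====
-- from typing import List, Optional
--
-- def filter_property_images(img_urls: List[str]) -> List[str]:
--     """Filter image URLs to prioritize property photos over UI elements"""
--     if not img_urls:
--         return []
--
--     property_images = []
--     ui_images = []
--
--     for img_url in img_urls:
--         # Skip obvious UI elements
--         if any(skip in img_url.lower() for skip in [
--             'logo', 'icon', 'btn_', 'button', 'nav_', 'menu_', 'header', 'footer',
--             'arrow', 'bullet', 'spacer', 'line', 'bg_', 'background', 'banner'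
--         ]):
--             continue
--
--         # Prioritize property-related images
--         if any(priority in img_url.lower() for priority in [
--             'property', 'house', 'home', 'villa', 'building', 'exterior', 'interior',
--             'photo', 'image', 'gallery', 'main', 'view', 'room'
--         ]):
--             property_images.append(img_url)
--         else:
--             ui_images.append(img_url)
--
--     # Combine: property photos first, then other images
--     final_images = property_images + ui_images
--
--     # Limit to 5 images total
--     return final_images[:5]
-- ===== SOURCE B (Python) =====
-- from typing import List
--
-- SKIP = ['logo', 'icon', 'btn_', 'button', 'nav_', 'menu_', 'header', 'footer',
--         'arrow', 'bullet', 'spacer', 'line', 'bg_', 'background', 'banner']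
-- PRIORITY = ['property', 'house', 'home', 'villa', 'building', 'exterior', 'interior',
--             'photo', 'image', 'gallery', 'main', 'view', 'room']
--
-- def filter_property_images(img_urls: List[str]) -> List[str]:
--     filtered = [u for u in img_urls if not any(s in u.lower() for s in SKIP)]
--     return sorted(filtered, key=lambda u: 0 if any(p in u.lower() for p in PRIORITY) else 1)[:5]
-- ===== Notes on version B (the rewrite author's own statement) =====
-- stated objective: idiomatic
-- what changed: Replaces the explicit two-bucket partition-and-concatenate loop with a filter comprehension followed by a single stable sort on a 0/1 priority key, then a slice to 5.
import Mathlib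
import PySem

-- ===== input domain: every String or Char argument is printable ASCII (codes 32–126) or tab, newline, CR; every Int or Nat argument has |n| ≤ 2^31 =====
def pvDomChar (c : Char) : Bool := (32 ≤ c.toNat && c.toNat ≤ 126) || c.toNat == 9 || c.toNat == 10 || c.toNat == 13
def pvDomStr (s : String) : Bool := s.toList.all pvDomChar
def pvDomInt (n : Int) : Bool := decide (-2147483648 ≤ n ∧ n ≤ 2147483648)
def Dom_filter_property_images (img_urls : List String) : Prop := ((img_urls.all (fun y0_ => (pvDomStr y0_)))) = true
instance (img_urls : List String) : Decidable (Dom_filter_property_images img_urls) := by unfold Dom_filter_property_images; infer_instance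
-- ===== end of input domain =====

-- B replaces A's two-bucket partition loop with filter + one stable sort on a 0/1 priority key (idiomatic, not faster).

-- ===== PORT A =====
def pvSkipKws : List String :=
  ["logo", "icon", "btn_", "button", "nav_", "menu_", "header", "footer",
   "arrow", "bullet", "spacer", "line", "bg_", "background", "banner"]
def pvPrioKws : List String :=
  ["property", "house", "home", "villa", "building", "exterior", "interior",
   "photo", "image", "gallery", "main", "view", "room"]

def filter_property_images (img_urls : List String) : List String :=
  if img_urls = [] then []
  else
    let st := img_urls.foldl (fun (st : List String × List String) img_url =>
      if pvSkipKws.any (fun skip => PySem.Str.isIn skip (PySem.Str.lower img_url)) then st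
      else if pvPrioKws.any (fun pr => PySem.Str.isIn pr (PySem.Str.lower img_url)) then
        (st.1 ++ [img_url], st.2)
      else (st.1, st.2 ++ [img_url])) ([], [])
    let final_images := st.1 ++ st.2
    PySem.List.slice final_images none (some 5)

-- ===== PORT B =====
def pvIsPrio (u : String) : Bool :=
  pvPrioKws.any (fun pr => PySem.Str.isIn pr (PySem.Str.lower u))

def filter_property_images_alt (img_urls : List String) : List String :=
  let filtered := img_urls.filter (fun u =>
    !(pvSkipKws.any (fun skip => PySem.Str.isIn skip (PySem.Str.lower u))))
  PySem.List.slice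
    (PySem.List.sorted filtered (fun u => if pvIsPrio u then (0 : Int) else 1) false)
    none (some 5)

-- ===== PRECONDITION & SPEC =====
def Spec_filter_property_images (img_urls : List String) (out : List String) : Prop := out = filter_property_images_alt img_urls
instance (img_urls : List String) (out : List String) : Decidable (Spec_filter_property_images img_urls out) := by unfold Spec_filter_property_images; infer_instance

-- ===== CLAIM (what is proved, stated in full; the proofs are below) =====
def Claim_equal_filter_property_images : Prop := ∀ (img_urls : List String), Dom_filter_property_images img_urls → Spec_filter_property_images img_urls (filter_property_images img_urls)

-- ===== LEMMAS AND PROOFS =====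

-- insertBy with all of A "not before x" and x before the head of B inserts x between A and B
theorem insertBy_middle {α : Type} (bef : α → α → Bool) (x : α) (A B : List α)
    (hA : ∀ a ∈ A, bef x a = false) (hB : ∀ b, B.head? = some b → bef x b = true) :
    PySem.List.insertBy bef x (A ++ B) = A ++ x :: B := by
  induction A with
  | nil =>
    cases B with
    | nil => simp [PySem.List.insertBy]
    | cons b bs => simp [PySem.List.insertBy, hB b rfl]
  | cons a as ih =>
    have hx : bef x a = false := hA a (by simp)
    simp [PySem.List.insertBy, hx]
    exact ih (fun a' ha' => hA a' (by simp [ha']))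

-- the stable sort on a 0/1 key is the partition: trues (in order) then falses (in order)
theorem foldl_insertBy_two_class {α : Type} (p : α → Bool) (xs A B : List α)
    (hA : ∀ a ∈ A, p a = true) (hB : ∀ b ∈ B, p b = false) :
    xs.foldl (fun acc x =>
        PySem.List.insertBy
          (fun a b => decide ((if p a then (0:Int) else 1) < (if p b then (0:Int) else 1)))
          x acc) (A ++ B)
      = (A ++ xs.filter p) ++ (B ++ xs.filter (fun x => !p x)) := by
  induction xs generalizing A B with
  | nil => simp
  | cons x t ih =>
    by_cases hx : p x = true
    · have h1 : PySem.List.insertBy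
          (fun a b => decide ((if p a then (0:Int) else 1) < (if p b then (0:Int) else 1)))
          x (A ++ B) = (A ++ [x]) ++ B := by
        rw [insertBy_middle _ _ A B]
        · simp
        · intro a ha; simp [hx, hA a ha]
        · intro b hb
          have : b ∈ B := List.mem_of_mem_head? hb
          simp [hx, hB b this]
      have hA' : ∀ a ∈ A ++ [x], p a = true := by
        intro a ha
        rcases List.mem_append.mp ha with h | h
        · exact hA a h
        · simp at h; simpa [h] using hx
      simp only [List.foldl_cons, h1]
      rw [ih (A ++ [x]) B hA' hB]
      simp [hx]
    · have hx' : p x = false := by simpa using hx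
      have h1 : PySem.List.insertBy
          (fun a b => decide ((if p a then (0:Int) else 1) < (if p b then (0:Int) else 1)))
          x (A ++ B) = (A ++ B) ++ [x] := by
        apply PySem.List.insertBy_of_forall_not_before
        intro y hy
        rcases List.mem_append.mp hy with h | h
        · simp [hx', hA y h]
        · simp [hx', hB y h]
      have hB' : ∀ b ∈ B ++ [x], p b = false := by
        intro b hb
        rcases List.mem_append.mp hb with h | h
        · exact hB b h
        · simp at h; simpa [h] using hx'
      simp only [List.foldl_cons, h1]
      rw [show (A ++ B) ++ [x] = A ++ (B ++ [x]) by simp]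
      rw [ih A (B ++ [x]) hA hB']
      simp [hx']

theorem sorted_two_class {α : Type} (p : α → Bool) (xs : List α) :
    PySem.List.sorted xs (fun x => if p x then (0:Int) else 1) false
      = xs.filter p ++ xs.filter (fun x => !p x) := by
  rw [PySem.List.sorted_eq_foldl_insertBy]
  simpa using foldl_insertBy_two_class p xs [] [] (by simp) (by simp)

-- A's loop accumulates exactly the two filters of the kept urls
theorem loopA_eq (xs : List String) (P U : List String) :
    xs.foldl (fun (st : List String × List String) img_url =>
      if pvSkipKws.any (fun skip => PySem.Str.isIn skip (PySem.Str.lower img_url)) then st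
      else if pvPrioKws.any (fun pr => PySem.Str.isIn pr (PySem.Str.lower img_url)) then
        (st.1 ++ [img_url], st.2)
      else (st.1, st.2 ++ [img_url])) (P, U)
    = (P ++ ((xs.filter (fun u => !(pvSkipKws.any (fun skip => PySem.Str.isIn skip (PySem.Str.lower u))))).filter pvIsPrio),
       U ++ ((xs.filter (fun u => !(pvSkipKws.any (fun skip => PySem.Str.isIn skip (PySem.Str.lower u))))).filter (fun u => !pvIsPrio u))) := by
  induction xs generalizing P U with
  | nil => simp
  | cons x t ih =>
    by_cases hs : pvSkipKws.any (fun skip => PySem.Str.isIn skip (PySem.Str.lower x)) = true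
    · rw [List.foldl_cons, if_pos hs, ih, List.filter_cons, if_neg (by simp only [hs]; decide)]
    · have hs' : (!pvSkipKws.any (fun skip => PySem.Str.isIn skip (PySem.Str.lower x))) = true := by
        simpa using hs
      rw [List.foldl_cons, if_neg hs,
          List.filter_cons, if_pos hs']
      by_cases hp : pvIsPrio x = true
      · rw [if_pos (show pvPrioKws.any (fun pr => PySem.Str.isIn pr (PySem.Str.lower x)) = true from hp),
            ih, List.filter_cons, if_pos hp, List.filter_cons, if_neg (by simp [hp])]
        simp
      · have hp' : pvIsPrio x = false := by simpa using hp
        rw [if_neg (show ¬ (pvPrioKws.any (fun pr => PySem.Str.isIn pr (PySem.Str.lower x)) = true) from hp),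
            ih, List.filter_cons, if_neg (by simp [hp']), List.filter_cons, if_pos (by simp [hp'])]
        simp

-- ===== VERDICT (by name: the statement is the Claim_ definition above) =====
theorem filter_property_images_spec : Claim_equal_filter_property_images := by
  intro img_urls _
  unfold Spec_filter_property_images filter_property_images filter_property_images_alt
  by_cases h : img_urls = []
  · subst h; simp [PySem.List.sorted, PySem.List.slice]
  · simp only [h, if_false]
    rw [loopA_eq img_urls [] []]
    rw [sorted_two_class pvIsPrio]
    simp [pvIsPrio]
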